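-- pv_equiv track=rewrite | github.com/terateams/GPTStudio | common/utils.py | format_latex
-- ===== SOURCE A (Python) =====
-- def format_latex(text: str) -> str:
--     """
--     格式化包含LaTeX公式的文本
--     将 \frac{a}{b} 这样的文本转换为可显示的LaTeX格式
--     """
--     # 如果文本中包含LaTeX公式（以\开头的内容），将其用$包围
--     if '\\' in text:
--         # 替换换行符为HTML换行
--         text = text.replace('\\n', '<br>')
--         # 分割文本，保留LaTeX公式
--         parts = []
--         current = []
--         in_latex = False
--
--         for char in text:
--             if char == '\\' and not in_latex:
--                 if current:
--                     parts.append(''.join(current))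
--                 current = [char]
--                 in_latex = True
--             elif in_latex and char in ' .,。，。!?！？':
--                 current.append(char)
--                 parts.append(f"${''.join(current)}$")
--                 current = []
--                 in_latex = False
--             else:
--                 current.append(char)
--
--         if current:
--             if in_latex:
--                 parts.append(f"${''.join(current)}$")
--             else:
--                 parts.append(''.join(current))
--
--         return ' '.join(parts)
--     return text
-- ===== SOURCE B (Python) =====
-- def format_latex(text: str) -> str:
--     """Index-cursor scan with str.find instead of a char-by-char state machine."""
--     if '\\' not in text:
--         return text
--     text = text.replace('\\n', '<br>')
--     DELIMS = ' .,。，。!?！？'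
--     parts = []
--     pos = 0
--     n = len(text)
--     while True:
--         j = text.find('\\', pos)
--         if j == -1:
--             if pos < n:
--                 parts.append(text[pos:])
--             break
--         if j > pos:
--             parts.append(text[pos:j])
--         k = j + 1
--         while k < n and text[k] not in DELIMS:
--             k += 1
--         if k < n:
--             parts.append(f"${text[j:k+1]}$")
--             pos = k + 1
--         else:
--             parts.append(f"${text[j:]}$")
--             break
--     return ' '.join(parts)
-- ===== Notes on version B (the rewrite author's own statement) =====
-- stated objective: alternative
-- what changed: Replaced the char-by-char state machine (parts/current/in_latex flags) by an index-cursor scan that uses str.find to jump to the next backslash and an inner scan to the terminating delimiter, slicing whole segments at once.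
import Mathlib
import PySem

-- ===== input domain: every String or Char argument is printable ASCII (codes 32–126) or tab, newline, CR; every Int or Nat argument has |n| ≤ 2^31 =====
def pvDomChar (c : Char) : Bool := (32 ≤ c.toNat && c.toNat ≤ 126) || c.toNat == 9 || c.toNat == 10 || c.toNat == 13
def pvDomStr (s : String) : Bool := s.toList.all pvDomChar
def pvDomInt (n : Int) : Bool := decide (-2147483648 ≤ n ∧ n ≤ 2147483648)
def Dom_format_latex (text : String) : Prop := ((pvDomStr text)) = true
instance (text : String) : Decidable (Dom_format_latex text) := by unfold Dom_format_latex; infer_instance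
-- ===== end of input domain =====

-- B replaces A's char-by-char state machine by an index-cursor scan that jumps between
-- whole segments (same cost; objective: alternative decomposition). Return value only.

-- char in ' .,。，。!?！？'
def fmtIsDelim (c : Char) : Bool := " .,。，。!?！？".toList.contains c

-- ===== PORT A =====
-- transliteration of A's for-loop: state = (parts, current, in_latex); parts kept as List (List Char)
def fmtALoop (parts : List (List Char)) (current : List Char) (inLatex : Bool) :
    List Char → List (List Char)
  | [] =>
      if current.isEmpty then parts
      else if inLatex then parts ++ [('$' :: current) ++ ['$']]
      else parts ++ [current]
  | c :: cs =>
      if c = '\\' ∧ ¬ inLatex then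
        fmtALoop (if current.isEmpty then parts else parts ++ [current]) [c] true cs
      else if inLatex ∧ fmtIsDelim c then
        fmtALoop (parts ++ [('$' :: (current ++ [c])) ++ ['$']]) [] false cs
      else
        fmtALoop parts (current ++ [c]) inLatex cs

def format_latex (text : String) : String :=
  if PySem.Str.isIn "\\" text then
    String.ofList (PySem.Chars.join [' ']
      (fmtALoop [] [] false (PySem.Str.replace text "\\n" "<br>").toList))
  else text

-- ===== PORT B =====
-- transliteration of Source B's cursor loop: the cursor suffix text[pos:] is the argument;
-- text.find('\\', pos) becomes takeWhile/dropWhile on the suffix, the inner k-scan likewise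
def fmtBLoop (rest : List Char) : List (List Char) :=
  let pre := rest.takeWhile (fun c => c != '\\')
  match h1 : rest.dropWhile (fun c => c != '\\') with
  | [] => if pre.isEmpty then [] else [pre]
  | b :: tl =>
      let head : List (List Char) := if pre.isEmpty then [] else [pre]
      let body := tl.takeWhile (fun c => !fmtIsDelim c)
      match h2 : tl.dropWhile (fun c => !fmtIsDelim c) with
      | [] => head ++ [('$' :: b :: body) ++ ['$']]
      | d :: tl' => head ++ (('$' :: b :: (body ++ [d])) ++ ['$']) :: fmtBLoop tl'
termination_by rest.length
decreasing_by
  have t1 := List.length_dropWhile_le (p := fun c => c != '\\') (l := rest)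
  have t2 := List.length_dropWhile_le (p := fun c => !fmtIsDelim c) (l := tl)
  rw [h1] at t1; rw [h2] at t2; simp at t1 t2; omega


def format_latex_alt (text : String) : String :=
  if PySem.Str.isIn "\\" text then
    String.ofList (PySem.Chars.join [' ']
      (fmtBLoop (PySem.Str.replace text "\\n" "<br>").toList))
  else text

-- ===== PRECONDITION & SPEC =====
def Spec_format_latex (text : String) (out : String) : Prop := out = format_latex_alt text
instance (text : String) (out : String) : Decidable (Spec_format_latex text out) := by unfold Spec_format_latex; infer_instance

-- ===== CLAIM (what is proved, stated in full; the proofs are below) =====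
def Claim_equal_format_latex : Prop := ∀ (text : String), Dom_format_latex text → Spec_format_latex text (format_latex text)

-- ===== LEMMAS AND PROOFS =====

theorem false_run_nil (cs : List Char) (h : cs.dropWhile (fun c => c != '\\') = []) :
    ∀ parts cur, fmtALoop parts cur false cs =
      if (cur ++ cs).isEmpty then parts else parts ++ [cur ++ cs] := by
  induction cs with
  | nil => intro parts cur; simp [fmtALoop]
  | cons c cs ih =>
      intro parts cur
      rw [List.dropWhile_cons] at h
      split at h
      · next hc =>
        have hc' : ¬ (c = '\\') := by simpa using hc
        rw [fmtALoop, if_neg (by simp [hc']), if_neg (by simp)]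
        exact (ih h parts (cur ++ [c])).trans (by simp)
      · exact absurd h (by simp)

theorem false_run_cons (cs tl : List Char)
    (h : cs.dropWhile (fun c => c != '\\') = '\\' :: tl) :
    ∀ parts cur, fmtALoop parts cur false cs =
      fmtALoop (if (cur ++ cs.takeWhile (fun c => c != '\\')).isEmpty then parts
                else parts ++ [cur ++ cs.takeWhile (fun c => c != '\\')]) ['\\'] true tl := by
  induction cs with
  | nil => simp at h
  | cons c cs ih =>
      intro parts cur
      rw [List.dropWhile_cons] at h
      split at h
      · next hc =>
        have hc' : ¬ (c = '\\') := by simpa using hc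
        rw [fmtALoop, if_neg (by simp [hc']), if_neg (by simp)]
        refine (ih h parts (cur ++ [c])).trans ?_
        simp [hc]
      · next hc =>
        have hc' : c = '\\' := by simpa using hc
        rw [List.cons_eq_cons] at h
        obtain ⟨he, rfl⟩ := h
        rw [fmtALoop, if_pos (by simp [hc'])]
        simp [hc']

theorem true_run_nil (tl : List Char) (h : tl.dropWhile (fun c => !fmtIsDelim c) = []) :
    ∀ parts cur, cur ≠ [] → fmtALoop parts cur true tl =
      parts ++ [('$' :: (cur ++ tl)) ++ ['$']] := by
  induction tl with
  | nil =>
      intro parts cur hcur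
      simp [fmtALoop, List.isEmpty_iff, hcur]
  | cons c tl ih =>
      intro parts cur hcur
      rw [List.dropWhile_cons] at h
      split at h
      · next hc =>
        have hc' : ¬ (fmtIsDelim c = true) := by simpa using hc
        rw [fmtALoop, if_neg (by simp), if_neg (by simp [hc'])]
        exact (ih h parts (cur ++ [c]) (by simp)).trans (by simp)
      · exact absurd h (by simp)

theorem true_run_cons (tl tl' : List Char) (d : Char)
    (h : tl.dropWhile (fun c => !fmtIsDelim c) = d :: tl') :
    ∀ parts cur, cur ≠ [] → fmtALoop parts cur true tl =
      fmtALoop (parts ++ [('$' :: (cur ++ tl.takeWhile (fun c => !fmtIsDelim c) ++ [d])) ++ ['$']])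
        [] false tl' := by
  induction tl with
  | nil => simp at h
  | cons c tl ih =>
      intro parts cur hcur
      rw [List.dropWhile_cons] at h
      split at h
      · next hc =>
        have hc' : ¬ (fmtIsDelim c = true) := by simpa using hc
        rw [fmtALoop, if_neg (by simp), if_neg (by simp [hc'])]
        refine (ih h parts (cur ++ [c]) (by simp)).trans ?_
        simp [hc]
      · next hc =>
        have hc' : fmtIsDelim c = true := by simpa using hc
        rw [List.cons_eq_cons] at h
        obtain ⟨rfl, rfl⟩ := h
        rw [fmtALoop, if_neg (by simp), if_pos (by simp [hc'])]
        simp [hc]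

theorem fmtBLoop_eq_nil (cs : List Char) (h1 : cs.dropWhile (fun c => c != '\\') = []) :
    fmtBLoop cs = if (cs.takeWhile (fun c => c != '\\')).isEmpty then []
                  else [cs.takeWhile (fun c => c != '\\')] := by
  rw [fmtBLoop]
  split
  · rfl
  · next b tl heq => rw [h1] at heq; cases heq

theorem fmtBLoop_eq_cons_nil (cs tl : List Char) (b : Char)
    (h1 : cs.dropWhile (fun c => c != '\\') = b :: tl)
    (h2 : tl.dropWhile (fun c => !fmtIsDelim c) = []) :
    fmtBLoop cs = (if (cs.takeWhile (fun c => c != '\\')).isEmpty then []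
                   else [cs.takeWhile (fun c => c != '\\')]) ++
                  [('$' :: b :: tl.takeWhile (fun c => !fmtIsDelim c)) ++ ['$']] := by
  rw [fmtBLoop]
  split
  · next heq => rw [h1] at heq; cases heq
  · next b0 tl0 heq =>
      rw [h1] at heq
      injection heq with hb htl
      subst hb; subst htl
      split <;>
        (split
         · simp
         · next d tl' heq2 => rw [h2] at heq2; cases heq2)

theorem fmtBLoop_eq_cons_cons (cs tl tl' : List Char) (b d : Char)
    (h1 : cs.dropWhile (fun c => c != '\\') = b :: tl)
    (h2 : tl.dropWhile (fun c => !fmtIsDelim c) = d :: tl') :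
    fmtBLoop cs = (if (cs.takeWhile (fun c => c != '\\')).isEmpty then []
                   else [cs.takeWhile (fun c => c != '\\')]) ++
                  (('$' :: b :: (tl.takeWhile (fun c => !fmtIsDelim c) ++ [d])) ++ ['$']) :: fmtBLoop tl' := by
  rw [fmtBLoop]
  split
  · next heq => rw [h1] at heq; cases heq
  · next b0 tl0 heq =>
      rw [h1] at heq
      injection heq with hb htl
      subst hb; subst htl
      split <;>
        (split
         · next heq2 => rw [h2] at heq2; cases heq2
         · next d0 tl0' heq2 =>
             rw [h2] at heq2
             injection heq2 with hd htl'
             subst hd; subst htl'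
             simp)

theorem main_loop (n : Nat) : ∀ cs : List Char, cs.length ≤ n →
    ∀ parts, fmtALoop parts [] false cs = parts ++ fmtBLoop cs := by
  induction n with
  | zero =>
      intro cs hcs parts
      have : cs = [] := by cases cs <;> simp_all
      subst this
      rw [fmtBLoop_eq_nil [] (by simp)]
      simp [fmtALoop]
  | succ n ih =>
      intro cs hcs parts
      cases h1 : cs.dropWhile (fun c => c != '\\') with
      | nil =>
          have hta : cs.takeWhile (fun c => c != '\\') = cs := by
            conv_rhs => rw [← List.takeWhile_append_dropWhile (p := fun c => c != '\\') (l := cs)]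
            rw [h1]; simp
          rw [false_run_nil cs h1, fmtBLoop_eq_nil cs h1, hta]
          simp only [List.nil_append]
          split <;> simp
      | cons b tl =>
          have hb : b = '\\' := by
            have := List.head?_dropWhile_not (p := fun c => c != '\\') (l := cs)
            rw [h1] at this; simpa using this
          subst hb
          rw [false_run_cons cs tl h1]
          cases h2 : tl.dropWhile (fun c => !fmtIsDelim c) with
          | nil =>
              have hta : tl.takeWhile (fun c => !fmtIsDelim c) = tl := by
                conv_rhs => rw [← List.takeWhile_append_dropWhile (p := fun c => !fmtIsDelim c) (l := tl)]
                rw [h2]; simp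
              rw [true_run_nil tl h2 _ _ (by simp), fmtBLoop_eq_cons_nil cs tl '\\' h1 h2, hta]
              simp only [List.nil_append]
              split <;> simp
          | cons d tl' =>
              have htl' : tl'.length ≤ n := by
                have t1 := List.length_dropWhile_le (p := fun c => c != '\\') (l := cs)
                have t2 := List.length_dropWhile_le (p := fun c => !fmtIsDelim c) (l := tl)
                rw [h1] at t1; rw [h2] at t2; simp at t1 t2; omega
              rw [true_run_cons tl tl' d h2 _ _ (by simp), ih tl' htl',
                  fmtBLoop_eq_cons_cons cs tl tl' '\\' d h1 h2]
              simp only [List.nil_append]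
              split <;> simp

-- ===== VERDICT (by name: the statement is the Claim_ definition above) =====
theorem format_latex_spec : Claim_equal_format_latex := by
  intro text _
  unfold Spec_format_latex format_latex format_latex_alt
  split
  · rw [main_loop _ (PySem.Str.replace text "\\n" "<br>").toList (le_refl _) []]
    rfl
  · rfl
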